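/-
  SSE ON THE FLAT USER MACHINE, PART 4: ONE RULE PER INSTRUCTION FORM of the stb_vorbis image.

  Every rule has the shape

      theorem wpUser_<form> (he : Legacy e) (hμ : SseMicro μ) [hs : SseOK u] [hhas : L.Has (u.ea a) n] …
          (h : Q () <the explicit new state>) : wpUser L μ (<the body as decoded> e operands) Q E u

  for an arbitrary fault condition `E` (the body raises nothing), so it applies under `Step.of_instr` with `E = fun _ _ => False`.
  The new state is the model's own term. FLOATING-POINT VALUES ARE OPAQUE to the safety proof: each rule that computes one has a
  corollary `…_opaque` whose hypothesis quantifies over the new vector-register value (and the new MXCSR, about which only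
  `SseOK` is known), so that a walker never sees an `FP.*` term.

  `SseTest.lean` applies every rule to the decoded instruction of the image it is for.
-/
import UserX.SseOps
set_option linter.unusedSimpArgs false
namespace X86
namespace Sem
open User

variable {L : Layout} {μ : Microarch} {Q : Unit → State → Prop} {E : Fault → State → Prop} {u : State} {e : Encoding}

/-! ### CPUID expressions on `μ` -/

/-- SSE, as the legacy row of a floating-point entry spells it. -/
theorem eval_simdFp_sse (hμ : SseMicro μ) : (FeatureExpr.simdFp Feature.sse .legacy).eval μ.cfg = true := hμ.sse
/-- SSE2, as the legacy row of a floating-point entry spells it. -/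
theorem eval_simdFp_sse2 (hμ : SseMicro μ) : (FeatureExpr.simdFp Feature.sse2 .legacy).eval μ.cfg = true := hμ.sse2

/-! ### MOVSS / MOVSD: loads and stores of one scalar -/

/-- The 512-bit value a load of `n` bytes at the operand `a` delivers (zero above the bytes read). -/
def _root_.X86.User.State.loadVec (u : State) (a : MemOp) (n : Nat) : Vec := BitVec.ofNat 512 (u.mem.readLE (u.ea a) n)

/-- **`movss xmm, m32`**: 4 bytes are read; bits 31:0 of the register take them, bits 127:32 are cleared, bits above 127 kept. -/
theorem wpUser_movss_load (he : Legacy e) (hμ : SseMicro μ) (dst : VReg) (a : MemOp) (hhas : L.Has (u.ea a) 4)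
    (h : Q () (u.writeVecLow .v128 dst
      (Vec.setElem ((0 : Vec).trunc 128) 32 0 (Vec.elem (u.loadVec a 4) 32 0 &&& Word.mask 32)))) :
    wpUser L μ (Insn.MOVSS.loadBody e dst a) Q E u := by
  unfold Insn.MOVSS.loadBody Insn.MOVSS.intelLoad Insn.MOVSS.featExpr
  simp only [wpUser_bind', wpUser_vendor, hμ.vendor, he.form_ne, he.isEvex, Bool.false_eq_true, if_false, wpUser_pure']
  rw [he.form]
  apply wpUser_simdEnterScalar he _ (eval_simdFp_sse hμ)
  apply wpUser_readEvexSrc_mem he hμ (scalarCtx 32) 4 a .scalar (scalarCtx_all 32)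
    (operandAttr_plain_small he _ _ (by decide) rfl rfl rfl) (by decide) hhas
  rw [wpUser_writeScalarMasked he]
  exact h

/-- **`movsd xmm, m64`**: 8 bytes are read; bits 63:0 of the register take them, bits 127:64 are cleared, bits above 127 kept. -/
theorem wpUser_movsd_load (he : Legacy e) (hμ : SseMicro μ) (dst : VReg) (a : MemOp) (hhas : L.Has (u.ea a) 8)
    (h : Q () (u.writeVecLow .v128 dst
      (Vec.setElem ((0 : Vec).trunc 128) 64 0 (Vec.elem (u.loadVec a 8) 64 0 &&& Word.mask 64)))) :
    wpUser L μ (Insn.MOVSD.loadBody e dst a) Q E u := by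
  unfold Insn.MOVSD.loadBody Insn.MOVSD.intelLoad Insn.MOVSD.featExpr
  simp only [wpUser_bind', wpUser_vendor, hμ.vendor, he.form_ne, he.isEvex, Bool.false_eq_true, if_false, wpUser_pure']
  rw [he.form]
  apply wpUser_simdEnterScalar he _ (eval_simdFp_sse2 hμ)
  apply wpUser_readEvexSrc_mem he hμ (scalarCtx 64) 8 a .scalar (scalarCtx_all 64)
    (operandAttr_plain_small he _ _ (by decide) rfl rfl rfl) (by decide) hhas
  rw [wpUser_writeScalarMasked he]
  exact h

/-- A scalar load changes one vector register and nothing else: the value is irrelevant to a safety proof. -/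
theorem wpUser_movss_load_opaque (he : Legacy e) (hμ : SseMicro μ) (dst : VReg) (a : MemOp) (hhas : L.Has (u.ea a) 4)
    (h : ∀ v : Vec, Q () (u.writeVecLow .v128 dst v)) : wpUser L μ (Insn.MOVSS.loadBody e dst a) Q E u :=
  wpUser_movss_load he hμ dst a hhas (h _)

theorem wpUser_movsd_load_opaque (he : Legacy e) (hμ : SseMicro μ) (dst : VReg) (a : MemOp) (hhas : L.Has (u.ea a) 8)
    (h : ∀ v : Vec, Q () (u.writeVecLow .v128 dst v)) : wpUser L μ (Insn.MOVSD.loadBody e dst a) Q E u :=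
  wpUser_movsd_load he hμ dst a hhas (h _)

/-- **`movss m32, xmm`**: the low 4 bytes of the register are stored at the operand. -/
theorem wpUser_movss_store (he : Legacy e) (hμ : SseMicro μ) (a : MemOp) (src : VReg) (hhas : L.Has (u.ea a) 4)
    (h : Q () (u.setMem (u.mem.writeLE (u.ea a) 4 ((u.readVec .v512 src).trunc 32).toNat))) :
    wpUser L μ (Insn.MOVSS.storeBody e a src) Q E u := by
  unfold Insn.MOVSS.storeBody Insn.MOVSS.intelStore Insn.MOVSS.featExpr
  simp only [wpUser_bind', wpUser_vendor, hμ.vendor, he.form_ne, he.isEvex, Bool.false_eq_true, if_false, wpUser_pure',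
    wpUser_checkMemDest he]
  rw [he.form]
  apply wpUser_simdEnterScalar he _ (eval_simdFp_sse hμ)
  rw [wpUser_readVec]
  exact wpUser_writeVecMaskedMem he hμ (scalarCtx 32) a _ .scalar rfl (scalarCtx_allActive 32) rfl
    (operandAttr_plain_small he _ _ (by decide) rfl rfl rfl) (by decide) hhas h

/-- **`movsd m64, xmm`**: the low 8 bytes of the register are stored at the operand. -/
theorem wpUser_movsd_store (he : Legacy e) (hμ : SseMicro μ) (a : MemOp) (src : VReg) (hhas : L.Has (u.ea a) 8)
    (h : Q () (u.setMem (u.mem.writeLE (u.ea a) 8 ((u.readVec .v512 src).trunc 64).toNat))) :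
    wpUser L μ (Insn.MOVSD.storeBody e a src) Q E u := by
  unfold Insn.MOVSD.storeBody Insn.MOVSD.intelStore Insn.MOVSD.featExpr
  simp only [wpUser_bind', wpUser_vendor, hμ.vendor, he.form_ne, he.isEvex, Bool.false_eq_true, if_false, wpUser_pure',
    wpUser_checkMemDest he]
  rw [he.form]
  apply wpUser_simdEnterScalar he _ (eval_simdFp_sse2 hμ)
  rw [wpUser_readVec]
  exact wpUser_writeVecMaskedMem he hμ (scalarCtx 64) a _ .scalar rfl (scalarCtx_allActive 64) rfl
    (operandAttr_plain_small he _ _ (by decide) rfl rfl rfl) (by decide) hhas h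

/-- A scalar store writes 4 bytes at the operand, whatever they are. -/
theorem wpUser_movss_store_opaque (he : Legacy e) (hμ : SseMicro μ) (a : MemOp) (src : VReg) (hhas : L.Has (u.ea a) 4)
    (h : ∀ v : Nat, Q () (u.setMem (u.mem.writeLE (u.ea a) 4 v))) : wpUser L μ (Insn.MOVSS.storeBody e a src) Q E u :=
  wpUser_movss_store he hμ a src hhas (h _)

/-- A scalar store writes 8 bytes at the operand, whatever they are. -/
theorem wpUser_movsd_store_opaque (he : Legacy e) (hμ : SseMicro μ) (a : MemOp) (src : VReg) (hhas : L.Has (u.ea a) 8)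
    (h : ∀ v : Nat, Q () (u.setMem (u.mem.writeLE (u.ea a) 8 v))) : wpUser L μ (Insn.MOVSD.storeBody e a src) Q E u :=
  wpUser_movsd_store he hμ a src hhas (h _)

/-! ### Scalar arithmetic: ADDSS ADDSD SUBSS SUBSD MULSS MULSD (`ADDSS.scalarFpArith`), DIVSS DIVSD (`DIVSS.scalarFpArith`) -/

/-- **The state after a scalar FP instruction with an XMM destination**: MXCSR takes the sticky flags of `f`, then the low 128
bits of `dst` become `v` (bits above 127 are kept). Nothing else changes: general registers, RIP, RFLAGS and memory are `u`'s. -/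
def _root_.X86.User.State.fpResult (u : State) (dst : VReg) (v : Vec) (f : FP.Flags) : State :=
  (u.setMxcsr (mxcsrAfter u.mxcsr f)).writeVecLow .v128 dst v

theorem fpResult_regs (dst : VReg) (v : Vec) (f : FP.Flags) : (u.fpResult dst v f).regs = u.regs := rfl
theorem fpResult_rip (dst : VReg) (v : Vec) (f : FP.Flags) : (u.fpResult dst v f).rip = u.rip := rfl
theorem fpResult_flags (dst : VReg) (v : Vec) (f : FP.Flags) : (u.fpResult dst v f).flags = u.flags := rfl
theorem fpResult_mem (dst : VReg) (v : Vec) (f : FP.Flags) : (u.fpResult dst v f).mem = u.mem := rfl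

/-- **The MXCSR invariant survives a scalar FP instruction.** -/
theorem _root_.X86.User.SseOK.fpResult (hs : SseOK u) (dst : VReg) (v : Vec) (f : FP.Flags) : SseOK (u.fpResult dst v f) :=
  (hs.after f).of_mxcsr rfl

/-- The opaque reading of `fpResult`: SOME MXCSR with every exception still masked, SOME value in the register. -/
theorem fpResult_opaque (hs : SseOK u) (dst : VReg) (v : Vec) (f : FP.Flags)
    (h : ∀ (w : Word) (x : Vec), w &&& 0x1F80 = 0x1F80 → Q () ((u.setMxcsr w).writeVecLow .v128 dst x)) :
    Q () (u.fpResult dst v f) :=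
  h _ _ (hs.after f).masks

/-- The element and the flags a scalar two-source operation produces (`fpScalar` under the legacy masking context). -/
def scalarArith (bits : Nat) (op : FpCtl → Nat → Nat → FP.X86.Result) (w : Word) (a b : Vec) : Word × FP.Flags :=
  fpScalar (fpCtlOf w) (scalarCtx bits) fun _ => op (fpCtlOf w) (a.fpElem bits 0) (b.fpElem bits 0)

/-- The CPUID gate of the legacy row of a scalar FP entry: SSE for the …SS entries, SSE2 for the …SD ones. -/
theorem wpUser_requireFeature_legacy {f : FeatureBit} (hf : f = Feature.sse ∨ f = Feature.sse2) (h : Q () u) :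
    wpUser L μ (Insn.requireFeature f) Q E u := by
  rcases hf with rfl | rfl
  · exact wpUser_requireFeature_sse h
  · exact wpUser_requireFeature_sse2 h

/-- **ADDSS / ADDSD / SUBSS / SUBSD / MULSS / MULSD `xmm, xmm`.** -/
theorem wpUser_scalarFpArith_reg (he : Legacy e) (hs : SseOK u) (bits : Nat) {feat : FeatureBit}
    (hf : feat = Feature.sse ∨ feat = Feature.sse2) (w1 : Bool) (op : FpCtl → Nat → Nat → FP.X86.Result)
    (dst src1 src2 : VReg)
    (h : Q () (u.fpResult dst
      (Vec.setElem ((u.readVec .v128 src1).trunc 128) bits 0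
        ((scalarArith bits op u.mxcsr (u.readVec .v128 src1) ((u.readVec .v512 src2).trunc (8 * (bits / 8) * 1))).1
          &&& Word.mask bits))
      (scalarArith bits op u.mxcsr (u.readVec .v128 src1) ((u.readVec .v512 src2).trunc (8 * (bits / 8) * 1))).2)) :
    wpUser L μ (Insn.ADDSS.scalarFpArith bits feat w1 op e dst src1 (.vreg src2)) Q E u := by
  unfold Insn.ADDSS.scalarFpArith
  simp only [he.form, wpUser_bind', wpUser_checkNoLock he]
  apply wpUser_requireFeature_legacy hf
  apply wpUser_requireSse
  simp only [wpUser_maskingScalar he, wpUser_fpCtl he, wpUser_readVec, wpUser_readEvexSrc_reg he]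
  apply wpUser_reportSimdFlags hs _ rfl
  rw [wpUser_writeScalarMasked he]
  exact h

/-- **ADDSS / SUBSS / MULSS `xmm, m32`** and **ADDSD / SUBSD / MULSD `xmm, m64`**: `bits / 8` bytes are read at the operand. -/
theorem wpUser_scalarFpArith_mem (he : Legacy e) (hμ : SseMicro μ) (hs : SseOK u) (bits : Nat) (hb : bits = 32 ∨ bits = 64)
    {feat : FeatureBit} (hf : feat = Feature.sse ∨ feat = Feature.sse2) (w1 : Bool)
    (op : FpCtl → Nat → Nat → FP.X86.Result) (dst src1 : VReg) (a : MemOp) (hhas : L.Has (u.ea a) (bits / 8))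
    (h : Q () (u.fpResult dst
      (Vec.setElem ((u.readVec .v128 src1).trunc 128) bits 0
        ((scalarArith bits op u.mxcsr (u.readVec .v128 src1) (u.loadVec a (bits / 8))).1 &&& Word.mask bits))
      (scalarArith bits op u.mxcsr (u.readVec .v128 src1) (u.loadVec a (bits / 8))).2)) :
    wpUser L μ (Insn.ADDSS.scalarFpArith bits feat w1 op e dst src1 (.vmem a)) Q E u := by
  have hlt : bits / 8 < 16 := by rcases hb with rfl | rfl <;> decide
  have hpos : 0 < bits / 8 := by rcases hb with rfl | rfl <;> decide
  unfold Insn.ADDSS.scalarFpArith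
  simp only [he.form, wpUser_bind', wpUser_checkNoLock he]
  apply wpUser_requireFeature_legacy hf
  apply wpUser_requireSse
  simp only [wpUser_maskingScalar he, wpUser_fpCtl he, wpUser_readVec]
  have hk : (scalarCtx bits).kl * (bits / 8) = bits / 8 := Nat.one_mul _
  apply wpUser_readEvexSrc_mem he hμ (scalarCtx bits) (bits / 8) a _ (scalarCtx_all bits)
    (by rw [hk]; exact operandAttr_plain_small he _ _ hlt rfl rfl rfl) (by rw [hk]; exact hpos) (by rw [hk]; exact hhas)
  rw [hk]
  apply wpUser_reportSimdFlags hs _ rfl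
  rw [wpUser_writeScalarMasked he]
  exact h

/-- **DIVSS / DIVSD `xmm, xmm`.** -/
theorem wpUser_scalarFpDiv_reg (he : Legacy e) (hs : SseOK u) (bits : Nat) {feat : FeatureBit}
    (hf : feat = Feature.sse ∨ feat = Feature.sse2) (w1 : Bool) (rc : FpRounding) (op : FpCtl → Nat → Nat → FP.X86.Result)
    (dst src1 src2 : VReg)
    (h : Q () (u.fpResult dst
      (Vec.setElem ((u.readVec .v128 src1).trunc 128) bits 0
        ((scalarArith bits op u.mxcsr (u.readVec .v128 src1) ((u.readVec .v512 src2).trunc (8 * (bits / 8) * 1))).1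
          &&& Word.mask bits))
      (scalarArith bits op u.mxcsr (u.readVec .v128 src1) ((u.readVec .v512 src2).trunc (8 * (bits / 8) * 1))).2)) :
    wpUser L μ (Insn.DIVSS.scalarFpArith bits feat w1 rc op e dst src1 (.vreg src2)) Q E u := by
  unfold Insn.DIVSS.scalarFpArith
  simp only [he.form, wpUser_bind', wpUser_checkNoLock he]
  apply wpUser_requireFeature_legacy hf
  apply wpUser_requireSse
  simp only [wpUser_maskingScalar he, wpUser_fpCtl he, wpUser_readVec, wpUser_readEvexSrc_reg he]
  apply wpUser_reportSimdFlags hs _ rfl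
  rw [wpUser_writeScalarMasked he]
  exact h

/-- **DIVSS `xmm, m32` / DIVSD `xmm, m64`**: `bits / 8` bytes are read at the operand. -/
theorem wpUser_scalarFpDiv_mem (he : Legacy e) (hμ : SseMicro μ) (hs : SseOK u) (bits : Nat) (hb : bits = 32 ∨ bits = 64)
    {feat : FeatureBit} (hf : feat = Feature.sse ∨ feat = Feature.sse2) (w1 : Bool) (rc : FpRounding)
    (op : FpCtl → Nat → Nat → FP.X86.Result) (dst src1 : VReg) (a : MemOp) (hhas : L.Has (u.ea a) (bits / 8))
    (h : Q () (u.fpResult dst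
      (Vec.setElem ((u.readVec .v128 src1).trunc 128) bits 0
        ((scalarArith bits op u.mxcsr (u.readVec .v128 src1) (u.loadVec a (bits / 8))).1 &&& Word.mask bits))
      (scalarArith bits op u.mxcsr (u.readVec .v128 src1) (u.loadVec a (bits / 8))).2)) :
    wpUser L μ (Insn.DIVSS.scalarFpArith bits feat w1 rc op e dst src1 (.vmem a)) Q E u := by
  have hlt : bits / 8 < 16 := by rcases hb with rfl | rfl <;> decide
  have hpos : 0 < bits / 8 := by rcases hb with rfl | rfl <;> decide
  unfold Insn.DIVSS.scalarFpArith
  simp only [he.form, wpUser_bind', wpUser_checkNoLock he]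
  apply wpUser_requireFeature_legacy hf
  apply wpUser_requireSse
  simp only [wpUser_maskingScalar he, wpUser_fpCtl he, wpUser_readVec]
  have hk : (scalarCtx bits).kl * (bits / 8) = bits / 8 := Nat.one_mul _
  apply wpUser_readEvexSrc_mem he hμ (scalarCtx bits) (bits / 8) a _ (scalarCtx_all bits)
    (by rw [hk]; exact operandAttr_plain_small he _ _ hlt rfl rfl rfl) (by rw [hk]; exact hpos) (by rw [hk]; exact hhas)
  rw [hk]
  apply wpUser_reportSimdFlags hs _ rfl
  rw [wpUser_writeScalarMasked he]
  exact h

/-- The opaque forms: one XMM register and the sticky MXCSR flags change; for the memory form `bits / 8` bytes must be readable. -/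
theorem wpUser_scalarFpArith_reg_opaque (he : Legacy e) (hs : SseOK u) (bits : Nat) {feat : FeatureBit}
    (hf : feat = Feature.sse ∨ feat = Feature.sse2) (w1 : Bool) (op : FpCtl → Nat → Nat → FP.X86.Result)
    (dst src1 src2 : VReg)
    (h : ∀ (w : Word) (x : Vec), w &&& 0x1F80 = 0x1F80 → Q () ((u.setMxcsr w).writeVecLow .v128 dst x)) :
    wpUser L μ (Insn.ADDSS.scalarFpArith bits feat w1 op e dst src1 (.vreg src2)) Q E u :=
  wpUser_scalarFpArith_reg he hs bits hf w1 op dst src1 src2 (fpResult_opaque hs dst _ _ h)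

theorem wpUser_scalarFpArith_mem_opaque (he : Legacy e) (hμ : SseMicro μ) (hs : SseOK u) (bits : Nat)
    (hb : bits = 32 ∨ bits = 64) {feat : FeatureBit} (hf : feat = Feature.sse ∨ feat = Feature.sse2) (w1 : Bool)
    (op : FpCtl → Nat → Nat → FP.X86.Result) (dst src1 : VReg) (a : MemOp) (hhas : L.Has (u.ea a) (bits / 8))
    (h : ∀ (w : Word) (x : Vec), w &&& 0x1F80 = 0x1F80 → Q () ((u.setMxcsr w).writeVecLow .v128 dst x)) :
    wpUser L μ (Insn.ADDSS.scalarFpArith bits feat w1 op e dst src1 (.vmem a)) Q E u :=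
  wpUser_scalarFpArith_mem he hμ hs bits hb hf w1 op dst src1 a hhas (fpResult_opaque hs dst _ _ h)

theorem wpUser_scalarFpDiv_reg_opaque (he : Legacy e) (hs : SseOK u) (bits : Nat) {feat : FeatureBit}
    (hf : feat = Feature.sse ∨ feat = Feature.sse2) (w1 : Bool) (rc : FpRounding)
    (op : FpCtl → Nat → Nat → FP.X86.Result) (dst src1 src2 : VReg)
    (h : ∀ (w : Word) (x : Vec), w &&& 0x1F80 = 0x1F80 → Q () ((u.setMxcsr w).writeVecLow .v128 dst x)) :
    wpUser L μ (Insn.DIVSS.scalarFpArith bits feat w1 rc op e dst src1 (.vreg src2)) Q E u :=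
  wpUser_scalarFpDiv_reg he hs bits hf w1 rc op dst src1 src2 (fpResult_opaque hs dst _ _ h)

theorem wpUser_scalarFpDiv_mem_opaque (he : Legacy e) (hμ : SseMicro μ) (hs : SseOK u) (bits : Nat)
    (hb : bits = 32 ∨ bits = 64) {feat : FeatureBit} (hf : feat = Feature.sse ∨ feat = Feature.sse2) (w1 : Bool)
    (rc : FpRounding) (op : FpCtl → Nat → Nat → FP.X86.Result) (dst src1 : VReg) (a : MemOp)
    (hhas : L.Has (u.ea a) (bits / 8))
    (h : ∀ (w : Word) (x : Vec), w &&& 0x1F80 = 0x1F80 → Q () ((u.setMxcsr w).writeVecLow .v128 dst x)) :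
    wpUser L μ (Insn.DIVSS.scalarFpArith bits feat w1 rc op e dst src1 (.vmem a)) Q E u :=
  wpUser_scalarFpDiv_mem he hμ hs bits hb hf w1 rc op dst src1 a hhas (fpResult_opaque hs dst _ _ h)

/-! ### Conversions between the two floating-point formats: CVTSS2SD, CVTSD2SS -/

/-- The source vector of a legacy scalar instruction: a register (its low element) or memory (`n` bytes). -/
def _root_.X86.User.State.scalarSrc (u : State) (n : Nat) : VOperand → Vec
  | .vreg r => (u.readVec .v512 r).trunc (8 * n * 1)
  | .vmem a => u.loadVec a n

/-- What a scalar memory source needs: its `n` bytes in the user region. Nothing for a register. -/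
def SrcOK (L : Layout) (u : State) (n : Nat) : VOperand → Prop
  | .vreg _ => True
  | .vmem a => L.Has (u.ea a) n

/-- **The scalar source reader** of a legacy instruction, register or memory (4 or 8 bytes). -/
theorem wpUser_readEvexSrc_scalar {Q : Vec → State → Prop} (he : Legacy e) (hμ : SseMicro μ) (bits n : Nat)
    (hn : n = 4 ∨ n = 8) (src : VOperand) (r : SimdMem) (hc : r.cls = none) (hal : r.aligned = false)
    (hh : r.hint = .normal) (hsrc : SrcOK L u n src) (h : Q (u.scalarSrc n src) u) :
    wpUser L μ (Insn.readEvexSrc e (scalarCtx bits) n src r none) Q E u := by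
  have hlt : n < 16 := by rcases hn with rfl | rfl <;> decide
  have hpos : 0 < n := by rcases hn with rfl | rfl <;> decide
  cases src with
  | vreg reg =>
    rw [wpUser_readEvexSrc_reg he]
    exact h
  | vmem a =>
    have hk : (scalarCtx bits).kl * n = n := Nat.one_mul _
    apply wpUser_readEvexSrc_mem he hμ (scalarCtx bits) n a r (scalarCtx_all bits)
      (by rw [hk]; exact operandAttr_plain_small he _ _ hlt hc hal hh) (by rw [hk]; exact hpos) (by rw [hk]; exact hsrc)
    rw [hk]
    exact h

/-- **CVTSS2SD `xmm, xmm/m32`**: SSE2; 4 bytes are read for a memory source. -/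
theorem wpUser_cvtss2sd (he : Legacy e) (hμ : SseMicro μ) (hs : SseOK u) (dst src1 : VReg) (src : VOperand)
    (hsrc : SrcOK L u 4 src)
    (h : ∀ (w : Word) (x : Vec), w &&& 0x1F80 = 0x1F80 → Q () ((u.setMxcsr w).writeVecLow .v128 dst x)) :
    wpUser L μ (Insn.CVTSS2SD.cvtss2sd e dst src1 src) Q E u := by
  unfold Insn.CVTSS2SD.cvtss2sd Insn.CVTSS2SD.cvtScalarFp
  simp only [wpUser_bind', wpUser_vendor, hμ.vendor, he.form, wpUser_checkNoLock he]
  apply wpUser_requireFeature_sse2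
  apply wpUser_requireSse
  simp only [wpUser_maskingScalar he, wpUser_fpCtl he, wpUser_readVec]
  apply wpUser_readEvexSrc_scalar he hμ 64 4 (Or.inl rfl) src _ rfl rfl rfl hsrc
  apply wpUser_reportSimdFlags hs _ rfl
  rw [wpUser_writeScalarMasked he]
  exact h _ _ (hs.after _).masks

/-- **CVTSD2SS `xmm, xmm/m64`**: SSE2; 8 bytes are read for a memory source. -/
theorem wpUser_cvtsd2ss (he : Legacy e) (hμ : SseMicro μ) (hs : SseOK u) (dst src1 : VReg) (src : VOperand)
    (hsrc : SrcOK L u 8 src)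
    (h : ∀ (w : Word) (x : Vec), w &&& 0x1F80 = 0x1F80 → Q () ((u.setMxcsr w).writeVecLow .v128 dst x)) :
    wpUser L μ (Insn.CVTSD2SS.cvtsd2ss e dst src1 src) Q E u := by
  unfold Insn.CVTSD2SS.cvtsd2ss Insn.CVTSD2SS.cvtScalarFp
  simp only [wpUser_bind', wpUser_vendor, hμ.vendor, he.form, wpUser_checkNoLock he]
  apply wpUser_requireFeature_sse2
  apply wpUser_requireSse
  simp only [wpUser_maskingScalar he, wpUser_fpCtl he, wpUser_readVec]
  apply wpUser_readEvexSrc_scalar he hμ 32 8 (Or.inr rfl) src _ rfl rfl rfl hsrc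
  apply wpUser_reportSimdFlags hs _ rfl
  rw [wpUser_writeScalarMasked he]
  exact h _ _ (hs.after _).masks

/-! ### Conversions from an integer: CVTSI2SS, CVTSI2SD -/

/-- What the general source operand of a conversion needs: a register of at most 64 bits, or memory of at most 64 bits inside
the user region. -/
def GprSrcOK (L : Layout) (u : State) : Operand → Prop
  | .reg w _ => w ≠ .w128
  | .mem w a => w ≠ .w128 ∧ L.Has (u.ea a) w.bytes
  | .regHi8 _ => True
  | .imm _ => True

/-- **A read of a general operand, its value left open** (all a conversion to floating point needs: the result is opaque). -/
theorem wpUser_readOp_any (op : Operand) {Q : BitVec op.width.bits → State → Prop} (hop : GprSrcOK L u op)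
    (h : ∀ x, Q x u) : wpUser L μ (Insn.readOp op) Q E u := by
  cases op with
  | imm v =>
    simp only [Insn.readOp, wpUser_pure']
    exact h _
  | regHi8 r =>
    simp only [Insn.readOp, Sem.get, wpUser_read_gprHi8T, wpUser_pure]
    exact h _
  | reg w r =>
    cases w with
    | w128 => exact absurd rfl hop
    | w8 | w16 | w32 | w64 =>
      simp only [Insn.readOp, Sem.get, wpUser_read_gprT_w8, wpUser_read_gprT_w16, wpUser_read_gprT_w32,
        wpUser_read_gprT_w64, wpUser_pure]
      exact h _
  | mem w a =>
    cases w with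
    | w128 => exact absurd rfl hop.1
    | w8 | w16 | w32 | w64 =>
      show wpUser L μ (Insn.readMemOp a _ { acAlign := _, writeIntent := false || false } >>=
        fun n => Pure.pure (BitVec.ofNat _ n)) Q E u
      rw [wpUser_bind']
      apply wpUser_readMemOp a _ _ ?_ ?_ hop.2
      · rw [wpUser_pure']
        exact h _
      · exact PlainAttr.of_unaligned rfl rfl rfl rfl
      · decide

/-- Clearing EVEX.b (what CVTSI2SD does to the encoding it reads the controls from at W0) keeps a legacy encoding legacy. -/
theorem _root_.X86.User.Legacy.clearB (he : Legacy e) : Legacy { e with b := false } := ⟨he.form, he.lock, he.ll⟩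

/-- **CVTSI2SS `xmm, r/m32` and `xmm, r/m64`**: SSE; 4 / 8 bytes are read for a memory source. -/
theorem wpUser_cvtsi2ss (he : Legacy e) (hμ : SseMicro μ) (hs : SseOK u) (dst src1 : VReg) (src : Operand)
    (hsrc : GprSrcOK L u src)
    (h : ∀ (w : Word) (x : Vec), w &&& 0x1F80 = 0x1F80 → Q () ((u.setMxcsr w).writeVecLow .v128 dst x)) :
    wpUser L μ (Insn.CVTSI2SS.cvtsi2ss e dst src1 src) Q E u := by
  unfold Insn.CVTSI2SS.cvtsi2ss Insn.CVTSI2SS.cvtSi2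
  simp only [wpUser_bind', wpUser_vendor, hμ.vendor, he.form, wpUser_checkNoLock he]
  apply wpUser_requireFeature_sse
  apply wpUser_requireSse
  simp only [wpUser_maskingScalar he, wpUser_fpCtl he, wpUser_readVec]
  apply wpUser_readOp_any src hsrc
  intro x
  apply wpUser_reportSimdFlags hs _ rfl
  rw [wpUser_writeScalarMasked he]
  exact h _ _ (hs.after _).masks

/-- **CVTSI2SD `xmm, r/m32` and `xmm, r/m64`**: SSE2; 4 / 8 bytes are read for a memory source. -/
theorem wpUser_cvtsi2sd (he : Legacy e) (hμ : SseMicro μ) (hs : SseOK u) (dst src1 : VReg) (src : Operand)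
    (hsrc : GprSrcOK L u src)
    (h : ∀ (w : Word) (x : Vec), w &&& 0x1F80 = 0x1F80 → Q () ((u.setMxcsr w).writeVecLow .v128 dst x)) :
    wpUser L μ (Insn.CVTSI2SD.cvtsi2sd e dst src1 src) Q E u := by
  unfold Insn.CVTSI2SD.cvtsi2sd
  simp only [wpUser_bind', wpUser_vendor, hμ.vendor, he.form, wpUser_checkNoLock he]
  apply wpUser_requireFeature_sse2
  apply wpUser_requireSse
  split
  · unfold Insn.CVTSI2SD.cvtSi2
    simp only [wpUser_bind', wpUser_maskingScalar he, wpUser_fpCtl he, wpUser_readVec]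
    apply wpUser_readOp_any src hsrc
    intro x
    apply wpUser_reportSimdFlags hs _ rfl
    rw [wpUser_writeScalarMasked he]
    exact h _ _ (hs.after _).masks
  · unfold Insn.CVTSI2SD.cvtSi2
    simp only [wpUser_bind', wpUser_maskingScalar he, wpUser_fpCtl he.clearB, wpUser_readVec]
    apply wpUser_readOp_any src hsrc
    intro x
    apply wpUser_reportSimdFlags hs _ rfl
    rw [wpUser_writeScalarMasked he]
    exact h _ _ (hs.after _).masks

/-! ### Conversion to an integer: CVTTSD2SI -/

/-- A write of a general register at its width (`writeOp` of a register operand). -/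
theorem wpUser_writeOp_reg (w : Width) (hw : w ≠ .w128) (r : Reg) (v : BitVec w.bits) :
    wpUser L μ (Insn.writeOp (.reg w r) v) Q E u = Q () (u.writePart w r v) := by
  cases w with
  | w128 => exact absurd rfl hw
  | w8 | w16 | w32 | w64 =>
    simp only [Insn.writeOp, Sem.put, wpUser_write_gprT_w8, wpUser_write_gprT_w16, wpUser_write_gprT_w32,
      wpUser_write_gprT_w64, wpUser_pure, true_and]

/-- **CVTTSD2SI `r32, xmm/m64` and `r64, xmm/m64`**: SSE2. THE DESTINATION REGISTER TAKES A VALUE ABOUT WHICH NOTHING IS KNOWN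
(a 32-bit write zero-extends: `State.writePart`); the sticky MXCSR flags may change; 8 bytes are read for a memory source. Code
that uses the converted integer as an index must range-check it. -/
theorem wpUser_cvttsd2si (he : Legacy e) (hμ : SseMicro μ) (hs : SseOK u) (w : Width) (hw : w ≠ .w128) (r : Reg)
    (src : VOperand) (hsrc : SrcOK L u 8 src)
    (h : ∀ (mx : Word) (x : BitVec w.bits), mx &&& 0x1F80 = 0x1F80 → Q () ((u.setMxcsr mx).writePart w r x)) :
    wpUser L μ (Insn.CVTTSD2SI.cvttsd2si e (.reg w r) src) Q E u := by
  unfold Insn.CVTTSD2SI.cvttsd2si Insn.CVTTSD2SI.cvt2si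
  simp only [wpUser_bind', wpUser_vendor, hμ.vendor, he.form, wpUser_checkNoLock he]
  apply wpUser_requireFeature_sse2
  apply wpUser_requireSse
  simp only [wpUser_maskingScalar he, wpUser_fpCtl he]
  apply wpUser_readEvexSrc_scalar he hμ (8 * 8) 8 (Or.inr rfl) src _ rfl rfl rfl hsrc
  apply wpUser_reportSimdFlags hs _ rfl
  rw [wpUser_writeOp_reg w hw]
  exact h _ _ (hs.after _).masks

/-! ### Compares into RFLAGS: COMISS COMISD UCOMISS UCOMISD -/

/-- The status-flag record of a floating-point compare (`comisToFlags`): ZF PF CF from the outcome, OF SF AF cleared. -/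
def comisStatus (r : FP.Cmp) : StatusFlags :=
  { zf := .set (fpCmpBits r).1, pf := .set (fpCmpBits r).2.1, cf := .set (fpCmpBits r).2.2,
    of := .set false, sf := .set false, af := .set false }

/-- No flag of a compare is left undefined. -/
theorem comisStatus_fill (r : FP.Cmp) (v : Flag → Bool) : (comisStatus r).fill v = comisStatus r := rfl

/-- **The six status flags after a compare**, for each of the four outcomes (SDM Vol. 2A COMISS: UNORDERED 111, GREATER_THAN 000,
LESS_THAN 001, EQUAL 100 in ZF PF CF): what a following `ja jae jb jbe je jne jp jnp` branches on. -/
theorem comis_zf (f : Flags) (r : FP.Cmp) : (f.setStatus (comisStatus r)) .zf = (fpCmpBits r).1 := by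
  simp [Flags.setStatus, comisStatus, Flags.write, Flags.get_set]
theorem comis_pf (f : Flags) (r : FP.Cmp) : (f.setStatus (comisStatus r)) .pf = (fpCmpBits r).2.1 := by
  simp [Flags.setStatus, comisStatus, Flags.write, Flags.get_set]
theorem comis_cf (f : Flags) (r : FP.Cmp) : (f.setStatus (comisStatus r)) .cf = (fpCmpBits r).2.2 := by
  simp [Flags.setStatus, comisStatus, Flags.write, Flags.get_set]
theorem comis_of (f : Flags) (r : FP.Cmp) : (f.setStatus (comisStatus r)) .of = false := by
  simp [Flags.setStatus, comisStatus, Flags.write, Flags.get_set]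
theorem comis_sf (f : Flags) (r : FP.Cmp) : (f.setStatus (comisStatus r)) .sf = false := by
  simp [Flags.setStatus, comisStatus, Flags.write, Flags.get_set]
theorem comis_af (f : Flags) (r : FP.Cmp) : (f.setStatus (comisStatus r)) .af = false := by
  simp [Flags.setStatus, comisStatus, Flags.write, Flags.get_set]

/-- The three flags of each outcome, spelled out. -/
theorem fpCmpBits_gt : fpCmpBits .gt = (false, false, false) := rfl
theorem fpCmpBits_lt : fpCmpBits .lt = (false, false, true) := rfl
theorem fpCmpBits_eq : fpCmpBits .eq = (true, false, false) := rfl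
theorem fpCmpBits_unordered : fpCmpBits .unordered = (true, true, true) := rfl

/-- **COMISS / UCOMISS `xmm, xmm/m32`, COMISD / UCOMISD `xmm, xmm/m64`.** RFLAGS takes the flags of ONE OF THE FOUR OUTCOMES
(`r : FP.Cmp` is left open: a floating-point value is opaque, so a proof splits on it); the sticky MXCSR flags may change;
`elemBits / 8` bytes are read for a memory source. `FlagsOK` of the new flags is `FlagsOK.setStatus`. -/
theorem wpUser_comis (he : Legacy e) (hμ : SseMicro μ) (hs : SseOK u) (hfl : FlagsOK u.flags) (f : FP.Format)
    (signaling : Bool) {feat : FeatureBit} (hf : feat = Feature.sse ∨ feat = Feature.sse2) (elemBits : Nat)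
    (hb : elemBits = 32 ∨ elemBits = 64) (evexW : Bool) (dst : VReg) (src : VOperand)
    (hsrc : SrcOK L u (elemBits / 8) src)
    (h : ∀ (mx : Word) (r : FP.Cmp), mx &&& 0x1F80 = 0x1F80 →
      Q () ((u.setMxcsr mx).setFlags (u.flags.setStatus (comisStatus r)))) :
    wpUser L μ (Insn.UCOMISS.comis e f signaling feat elemBits evexW dst src) Q E u := by
  have hfeat : (FeatureExpr.simdFp feat .legacy).eval μ.cfg = true := by
    rcases hf with rfl | rfl
    · exact hμ.sse
    · exact hμ.sse2
  have hn : elemBits / 8 = 4 ∨ elemBits / 8 = 8 := by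
    rcases hb with rfl | rfl
    · exact Or.inl rfl
    · exact Or.inr rfl
  unfold Insn.UCOMISS.comis Insn.UCOMISS.intelPath Insn.UCOMISS.compareToFlags Insn.comisToFlags
  simp only [he.form_evex, Bool.false_eq_true, if_false, wpUser_bind', wpUser_vendor, hμ.vendor, he.isEvex, he.form_ne,
    wpUser_pure']
  rw [he.form]
  apply wpUser_simdEnterScalar he _ hfeat
  simp only [wpUser_fpCtl he, wpUser_readVec]
  apply wpUser_readEvexSrc_scalar he hμ elemBits (elemBits / 8) hn src _ rfl rfl rfl hsrc
  apply wpUser_reportSimdFlags hs _ rfl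
  refine wpUser_commitStatus _ _ (u := u.setMxcsr _) hfl ?_
  intro v
  exact h _ (FP.X86.compare f signaling _ _ _).1 (hs.after _).masks

/-! ### 128-bit moves: MOVAPS MOVAPD `xmm, xmm`; MOVDQU `xmm, m128`; MOVUPS `m128, xmm` -/

/-- The facts about a `MOVAPS.Spec` the legacy rows use: the element size is 32 or 64 bits and the legacy CPUID column is SSE or
SSE2. (MOVAPS, MOVAPD, MOVUPS, MOVDQU: by `decide`-free unfolding, see the instances below.) -/
structure MoveSpec (s : Insn.MOVAPS.Spec) (e : Encoding) (μ : Microarch) : Prop where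
  bits : s.elemBits e = 32 ∨ s.elemBits e = 64
  feat : (s.feat e .v128).eval μ.cfg = true

theorem moveSpec_movaps (he : Legacy e) (hμ : SseMicro μ) : MoveSpec Insn.MOVAPS.spec e μ := by
  refine ⟨Or.inl rfl, ?_⟩
  simp only [Insn.MOVAPS.spec, he.isEvex, Bool.false_eq_true, if_false, he.form]
  exact hμ.sse

theorem moveSpec_movapd (he : Legacy e) (hμ : SseMicro μ) : MoveSpec Insn.MOVAPD.spec e μ := by
  refine ⟨Or.inr rfl, ?_⟩
  simp only [Insn.MOVAPD.spec, he.isEvex, Bool.false_eq_true, if_false, he.form]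
  exact hμ.sse2

theorem moveSpec_movups (he : Legacy e) (hμ : SseMicro μ) : MoveSpec Insn.MOVUPS.spec e μ := by
  refine ⟨Or.inl rfl, ?_⟩
  simp only [Insn.MOVUPS.spec, he.isEvex, Bool.false_eq_true, if_false, he.form]
  exact hμ.sse

theorem moveSpec_movdqu (he : Legacy e) (hμ : SseMicro μ) : MoveSpec Insn.MOVDQU_VMOVDQU8_16_32_64.spec e μ := by
  refine ⟨Or.inl ?_, ?_⟩
  · simp only [Insn.MOVDQU_VMOVDQU8_16_32_64.spec, he.isEvex, Bool.false_and, Bool.false_eq_true, if_false]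
  · simp only [Insn.MOVDQU_VMOVDQU8_16_32_64.spec, he.isEvex, Bool.false_eq_true, if_false, he.form]
    exact hμ.sse2

/-- **MOVAPS / MOVAPD `xmm, xmm`** (the `28 /r` rows with a register source): the low 128 bits of `dst` become those of `src`;
bits above 127 of `dst` are kept. -/
theorem wpUser_movap_reg (he : Legacy e) (hμ : SseMicro μ) (s : Insn.MOVAPS.Spec) (hsp : MoveSpec s e μ) (dst src : VReg)
    (h : Q () (u.writeVecLow .v128 dst (u.readVec .v512 src))) :
    wpUser L μ (Insn.MOVAPS.execRm s e dst (.vreg src)) Q E u := by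
  unfold Insn.MOVAPS.execRm Insn.MOVAPS.intelRm Insn.MOVAPS.wCheck
  simp only [wpUser_bind', wpUser_vendor, hμ.vendor, show (Vendor.intel == Vendor.amd) = false from rfl, Bool.false_and,
    Bool.false_eq_true, if_false, he.form_ne, he.isEvex, wpUser_pure']
  apply wpUser_simdEnter he _ hsp.feat _ _ _ _ _ (by decide)
  rw [wpUser_readEvexSrc_reg he]
  rcases hsp.bits with hb | hb
  · rw [hb, wpUser_writeVecMasked32 he]
    have e1 : (8 * (32 / 8) * (packedCtx 32 32).kl) = 128 := rfl
    rw [e1, writeVecLow_trunc]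
    exact h
  · rw [hb, wpUser_writeVecMasked64 he]
    have e1 : (8 * (64 / 8) * (packedCtx 64 64).kl) = 128 := rfl
    rw [e1, writeVecLow_trunc]
    exact h

/-- **MOVDQU / MOVUPS `xmm, m128`** (explicitly unaligned load): 16 bytes are read, the low 128 bits of `dst` take them. -/
theorem wpUser_movu_load (he : Legacy e) (hμ : SseMicro μ) (s : Insn.MOVAPS.Spec) (hsp : MoveSpec s e μ)
    (hacc : s.acc e = SimdMem.unalignedMove) (dst : VReg) (a : MemOp) (hhas : L.Has (u.ea a) 16)
    (h : Q () (u.writeVecLow .v128 dst (u.loadVec a 16))) :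
    wpUser L μ (Insn.MOVAPS.execRm s e dst (.vmem a)) Q E u := by
  unfold Insn.MOVAPS.execRm Insn.MOVAPS.intelRm Insn.MOVAPS.wCheck
  simp only [wpUser_bind', wpUser_vendor, hμ.vendor, show (Vendor.intel == Vendor.amd) = false from rfl, Bool.false_and,
    Bool.false_eq_true, if_false, he.form_ne, he.isEvex, wpUser_pure', hacc]
  apply wpUser_simdEnter he _ hsp.feat _ _ _ _ _ (by decide)
  rcases hsp.bits with hb | hb
  · rw [hb]
    have e16 : (packedCtx 32 32).kl * (32 / 8) = 16 := by decide
    apply wpUser_readEvexSrc_mem he hμ (packedCtx 32 32) (32 / 8) a SimdMem.unalignedMove packedCtx32_all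
      (by rw [e16]; exact operandAttr_plain_unaligned16 he) (by decide) (by rw [e16]; exact hhas)
    rw [wpUser_writeVecMasked32 he, e16]
    exact h
  · rw [hb]
    have e16 : (packedCtx 64 64).kl * (64 / 8) = 16 := by decide
    apply wpUser_readEvexSrc_mem he hμ (packedCtx 64 64) (64 / 8) a SimdMem.unalignedMove packedCtx64_all
      (by rw [e16]; exact operandAttr_plain_unaligned16 he) (by decide) (by rw [e16]; exact hhas)
    rw [wpUser_writeVecMasked64 he, e16]
    exact h

/-- **MOVUPS / MOVDQU `m128, xmm`** (explicitly unaligned store): the low 16 bytes of `src` are stored at the operand. -/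
theorem wpUser_movu_store (he : Legacy e) (hμ : SseMicro μ) (s : Insn.MOVAPS.Spec) (hsp : MoveSpec s e μ)
    (hacc : s.acc e = SimdMem.unalignedMove) (a : MemOp) (src : VReg) (hhas : L.Has (u.ea a) 16)
    (h : Q () (u.setMem (u.mem.writeLE (u.ea a) 16 ((u.readVec .v128 src).trunc 128).toNat))) :
    wpUser L μ (Insn.MOVAPS.execMr s e (.vmem a) src) Q E u := by
  unfold Insn.MOVAPS.execMr Insn.MOVAPS.intelMr Insn.MOVAPS.wCheck Insn.writeEvexDst
  simp only [wpUser_bind', wpUser_vendor, hμ.vendor, show (Vendor.intel == Vendor.amd) = false from rfl, Bool.false_and,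
    Bool.false_eq_true, if_false, he.form_ne, he.isEvex, wpUser_pure', hacc, VOperand.isMem, if_true,
    wpUser_checkMemDest he]
  apply wpUser_simdEnter he _ hsp.feat _ _ _ _ _ (by decide)
  rw [wpUser_readVec]
  rcases hsp.bits with hb | hb
  · rw [hb]
    have e16 : (packedCtx 32 32).kl * ((packedCtx 32 32).elemBits / 8) = 16 := by decide
    have e128 : (packedCtx 32 32).elemBits * (packedCtx 32 32).kl = 128 := by decide
    apply wpUser_writeVecMaskedMem he hμ (packedCtx 32 32) a _ SimdMem.unalignedMove rfl packedCtx32_allActive rfl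
      (by rw [e16]; exact operandAttr_plain_unaligned16 he) (by decide) (by rw [e16]; exact hhas)
    rw [e16, e128]
    exact h
  · rw [hb]
    have e16 : (packedCtx 64 64).kl * ((packedCtx 64 64).elemBits / 8) = 16 := by decide
    have e128 : (packedCtx 64 64).elemBits * (packedCtx 64 64).kl = 128 := by decide
    apply wpUser_writeVecMaskedMem he hμ (packedCtx 64 64) a _ SimdMem.unalignedMove rfl packedCtx64_allActive rfl
      (by rw [e16]; exact operandAttr_plain_unaligned16 he) (by decide) (by rw [e16]; exact hhas)
    rw [e16, e128]
    exact h

/-! ### The 16-byte struct copy: MOVDQU load, then MOVUPS store, moves the bytes unchanged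

`vorbis_init` copies a 16-byte structure (a pointer pair) with `movdqu xmm0, [rbp]; movups [rbx+0x70], xmm0`. Here the VALUE
matters: the bytes stored are the bytes loaded. -/

/-- A little-endian read of `n` bytes is below `2 ^ (8 n)`. -/
theorem _root_.X86.User.Mem.readLE_lt (f : Mem) (a : Word) (n : Nat) : f.readLE a n < 2 ^ (8 * n) := by
  induction n generalizing a with
  | zero => simp [Mem.readLE]
  | succ n ih =>
    have h1 := ih (a + 1)
    have h2 : (f.read a).toNat < 256 := (f.read a).toNat_lt
    rw [Mem.readLE]
    have e : 2 ^ (8 * (n + 1)) = 256 * 2 ^ (8 * n) := by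
      rw [Nat.mul_add, Nat.pow_add]
      simp [Nat.mul_comm]
    rw [e]
    omega

set_option exponentiation.threshold 1000 in
/-- A number below `2 ^ 128`, as a vector, truncated to 128 bits, is that number. -/
theorem trunc128_toNat (n : Nat) (h : n < 2 ^ 128) : (Vec.trunc (BitVec.ofNat 512 n) 128).toNat = n := by
  unfold Vec.trunc Vec.lowMask
  rw [BitVec.toNat_and]
  have hm : (BitVec.allOnes 512 >>> (512 - 128)).toNat = 2 ^ 128 - 1 := by
    rw [BitVec.toNat_ushiftRight, BitVec.toNat_allOnes]
    rfl
  rw [hm, Nat.and_two_pow_sub_one_eq_mod, BitVec.toNat_ofNat]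
  have h512 : (2 : Nat) ^ 128 ≤ 2 ^ 512 := Nat.pow_le_pow_right (by decide) (by decide)
  have : n < 2 ^ 512 := Nat.lt_of_lt_of_le h h512
  rw [Nat.mod_eq_of_lt this, Nat.mod_eq_of_lt h]

/-- Truncating to 128 bits twice is truncating once. -/
theorem trunc128_idem (x : Vec) : (x.trunc 128).trunc 128 = x.trunc 128 := by
  simp only [Vec.trunc, Vec.lowMask, Nat.reduceSub]
  unfold Vec at *
  bv_decide

/-- **The value MOVUPS stores after MOVDQU loaded it** (`wpUser_movu_load` then `wpUser_movu_store` on the same register, RIP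
moved in between or not): the number read from the 16 source bytes. `v` is any state whose vector registers are those the
load left. -/
theorem movu_roundtrip (a : MemOp) (r : VReg) (v : State) (hv : v.zmm = (u.writeVecLow .v128 r (u.loadVec a 16)).zmm) :
    ((v.readVec .v128 r).trunc 128).toNat = u.mem.readLE (u.ea a) 16 := by
  have e : v.readVec .v128 r = (u.writeVecLow .v128 r (u.loadVec a 16)).readVec .v128 r := by
    unfold State.readVec
    rw [hv]
  rw [e, readVec_writeVecLow, trunc128_idem]
  exact trunc128_toNat _ (Mem.readLE_lt u.mem (u.ea a) 16)

/-! ### Bitwise logic: PXOR `xmm, xmm`; XORPS / XORPD `xmm, xmm` and `xmm, m128` -/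

/-- **PAND / PANDN / POR / PXOR `xmm, xmm`** (`PAND.packedLogic`): SSE2; the low 128 bits of `dst` become `fv` of the two 128-bit
views. (`pxor x, x` is how the compiler zeroes a register before a conversion; the value is irrelevant to a safety proof.) -/
theorem wpUser_packedLogic_reg (he : Legacy e) (hμ : SseMicro μ) (fv : Vec → Vec → Vec) (fw : Word → Word → Word)
    (dst src1 src2 : VReg)
    (h : Q () (u.writeVecLow .v128 dst (fv (u.readVec .v128 src1) ((u.readVec .v512 src2).trunc 128)))) :
    wpUser L μ (Insn.PAND.packedLogic fv fw e dst src1 (.vreg src2)) Q E u := by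
  have hfeat : (Insn.PAND.feat e.form .v128).eval μ.cfg = true := by
    rw [he.form]
    exact hμ.sse2
  unfold Insn.PAND.packedLogic Insn.PAND.packedIntel
  simp only [he.isEvex, Bool.false_eq_true, if_false, Bool.false_and, wpUser_bind', wpUser_vendor, hμ.vendor]
  have hesz : (if (e.isEvex && e.w) = true then 64 else 32) = 32 := by
    simp [he.isEvex]
  rw [hesz]
  refine wpUser_simdEnter he (Insn.PAND.feat e.form) hfeat 32 _ {} 32 [128, 256, 512] rfl false ?_
  rw [wpUser_readVec, wpUser_readEvexSrc_reg he, wpUser_writeVecMasked32 he]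
  exact h

/-- **ANDPS / ANDPD / ORPS / ORPD / XORPS / XORPD `xmm, xmm`** (`ANDPS.logic`): the low 128 bits of `dst` become the lane-wise
`f` of the two sources. -/
theorem wpUser_fpLogic_reg (he : Legacy e) (hμ : SseMicro μ) {feat : FeatureBit}
    (hf : feat = Feature.sse ∨ feat = Feature.sse2) (bits : Nat) (hb : bits = 32 ∨ bits = 64) (w1 : Bool)
    (f : Word → Word → Word) (dst src1 src2 : VReg) (h : ∀ x : Vec, Q () (u.writeVecLow .v128 dst x)) :
    wpUser L μ (Insn.ANDPS.logic feat bits w1 f e dst src1 (.vreg src2)) Q E u := by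
  have hfeat : (FeatureExpr.simdFpAvx512 feat e.form .v128 Feature.avx512dq).eval μ.cfg = true := by
    simp only [FeatureExpr.simdFpAvx512, he.form_evex, Bool.false_eq_true, if_false, he.form]
    rcases hf with rfl | rfl
    · exact hμ.sse
    · exact hμ.sse2
  unfold Insn.ANDPS.logic Insn.simdLogic
  simp only [he.isEvex, Bool.false_eq_true, if_false, wpUser_bind', wpUser_vendor, hμ.vendor, he.form_eq, if_true]
  apply wpUser_simdEnter he _ hfeat _ _ _ _ _ (by decide)
  rw [wpUser_readVec, wpUser_readEvexSrc_reg he]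
  rcases hb with rfl | rfl
  · rw [wpUser_writeVecMasked32 he]
    exact h _
  · rw [wpUser_writeVecMasked64 he]
    exact h _

/-- **XORPS / XORPD … `xmm, m128`**: a 16-byte operand under the legacy 16-byte rule. Side conditions: the 16 bytes lie in the
user region AND the effective address is 16-byte aligned (else `#GP(0)`). -/
theorem wpUser_fpLogic_mem (he : Legacy e) (hμ : SseMicro μ) {feat : FeatureBit}
    (hf : feat = Feature.sse ∨ feat = Feature.sse2) (bits : Nat) (hb : bits = 32 ∨ bits = 64) (w1 : Bool)
    (f : Word → Word → Word) (dst src1 : VReg) (a : MemOp) (halign : (u.ea a).aligned 16 = true)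
    (hhas : L.Has (u.ea a) 16) (h : ∀ x : Vec, Q () (u.writeVecLow .v128 dst x)) :
    wpUser L μ (Insn.ANDPS.logic feat bits w1 f e dst src1 (.vmem a)) Q E u := by
  have hfeat : (FeatureExpr.simdFpAvx512 feat e.form .v128 Feature.avx512dq).eval μ.cfg = true := by
    simp only [FeatureExpr.simdFpAvx512, he.form_evex, Bool.false_eq_true, if_false, he.form]
    rcases hf with rfl | rfl
    · exact hμ.sse
    · exact hμ.sse2
  unfold Insn.ANDPS.logic Insn.simdLogic
  simp only [he.isEvex, Bool.false_eq_true, if_false, wpUser_bind', wpUser_vendor, hμ.vendor, he.form_eq, if_true]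
  apply wpUser_simdEnter he _ hfeat _ _ _ _ _ (by decide)
  rw [wpUser_readVec]
  rcases hb with rfl | rfl
  · apply wpUser_readEvexSrc_mem16 he hμ (packedCtx 32 32) _ a {} rfl (by decide) packedCtx32_all rfl rfl rfl rfl halign hhas
    rw [wpUser_writeVecMasked32 he]
    exact h _
  · apply wpUser_readEvexSrc_mem16 he hμ (packedCtx 64 64) _ a {} rfl (by decide) packedCtx64_all rfl rfl rfl rfl halign hhas
    rw [wpUser_writeVecMasked64 he]
    exact h _

/-! ### Moves between general and vector registers: MOVD, MOVQ -/

/-- **MOVD `xmm, r32` / MOVQ `xmm, r64`**: SSE2; the low 128 bits of `dst` become the zero-extended register value. Only the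
vector register changes. -/
theorem wpUser_movd_to_xmm (he : Legacy e) (hμ : SseMicro μ) (dst : VReg) (w : Width) (hw : w = .w32 ∨ w = .w64) (r : Reg)
    (h : Q () (u.writeVecLow .v128 dst (Vec.ofWord (Word.ofBV (u.part w r))))) :
    wpUser L μ (Insn.MOVD_MOVQ.execRm e dst (.reg w r)) Q E u := by
  unfold Insn.MOVD_MOVQ.execRm Insn.MOVD_MOVQ.enterMove Insn.MOVD_MOVQ.feat
  simp only [wpUser_bind', wpUser_vendor, hμ.vendor, show (Vendor.intel == Vendor.amd) = false from rfl, Bool.and_false,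
    Bool.false_eq_true, if_false, wpUser_checkFormCommon he, he.form_eq, if_true, wpUser_checkNoLock he]
  rw [he.form]
  apply wpUser_requireSimd_legacy (FeatureExpr.bit Feature.sse2) hμ.sse2
  rcases hw with rfl | rfl
  · simp only [Insn.readOp, Sem.get, wpUser_read_gprT_w32, wpUser_pure, he.upper, wpUser_writeVec_preserve]
    exact h
  · simp only [Insn.readOp, Sem.get, wpUser_read_gprT_w64, wpUser_pure, he.upper, wpUser_writeVec_preserve]
    exact h

/-- **MOVD `r32, xmm` / MOVQ `r64, xmm`**: SSE2; the general register takes the low 32 / 64 bits of the vector register (a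
32-bit write zero-extends). Only the general register changes. -/
theorem wpUser_movd_from_xmm (he : Legacy e) (hμ : SseMicro μ) (w : Width) (hw : w = .w32 ∨ w = .w64) (r : Reg) (src : VReg)
    (h : Q () (u.writePart w r ((Vec.toWord (u.readVec .v128 src)).toBV w.bits))) :
    wpUser L μ (Insn.MOVD_MOVQ.execMr e (.reg w r) src) Q E u := by
  unfold Insn.MOVD_MOVQ.execMr Insn.MOVD_MOVQ.enterMove Insn.MOVD_MOVQ.feat
  simp only [wpUser_bind', wpUser_vendor, hμ.vendor, show (Vendor.intel == Vendor.amd) = false from rfl, Bool.and_false,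
    Bool.false_eq_true, if_false, wpUser_checkFormCommon he, he.form_eq, if_true, wpUser_checkNoLock he]
  rw [he.form]
  apply wpUser_requireSimd_legacy (FeatureExpr.bit Feature.sse2) hμ.sse2
  rw [wpUser_readVec]
  rcases hw with rfl | rfl
  · rw [wpUser_writeOp_reg _ (by decide)]
    exact h
  · rw [wpUser_writeOp_reg _ (by decide)]
    exact h

/-- The opaque form: the general register takes SOME value of its width. -/
theorem wpUser_movd_from_xmm_opaque (he : Legacy e) (hμ : SseMicro μ) (w : Width) (hw : w = .w32 ∨ w = .w64) (r : Reg)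
    (src : VReg) (h : ∀ x : BitVec w.bits, Q () (u.writePart w r x)) :
    wpUser L μ (Insn.MOVD_MOVQ.execMr e (.reg w r) src) Q E u :=
  wpUser_movd_from_xmm he hμ w hw r src (h _)

end Sem
end X86
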